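-- pv_equiv track=rewrite | github.com/edtnguyen/fate_programDE | src/models/pyro_model.py | resolve_fate_names
-- ===== SOURCE A (Python) =====
-- from typing import TYPE_CHECKING, Optional, Sequence
--
-- DEFAULT_REF_FATE = "EC"
--
-- def resolve_fate_names(
--     fate_names: Sequence[str],
--     ref_fate: str = DEFAULT_REF_FATE,
-- ) -> tuple[tuple[str, ...], list[str], int, list[int]]:
--     """
--     Validate fate names and return non-reference ordering plus indices.
--
--     Returns
--     -------
--     tuple
--         (fate_names, non_ref_fates, ref_idx, non_ref_indices)
--     """
--     fate_names = tuple(fate_names)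
--     if len(fate_names) != len(set(fate_names)):
--         raise ValueError(f"fate_names must be unique (got {fate_names})")
--     if len(fate_names) != 3:
--         raise ValueError(f"Expected exactly 3 fates (got {fate_names})")
--     if ref_fate not in fate_names:
--         raise ValueError(f"ref_fate '{ref_fate}' not found in fate_names={fate_names}")
--     non_ref_fates = [fate for fate in fate_names if fate != ref_fate]
--     if len(non_ref_fates) != 2:
--         raise ValueError(
--             f"Expected 2 non-reference fates (ref_fate={ref_fate}, fate_names={fate_names})"
--         )
--     ref_idx = fate_names.index(ref_fate)
--     non_ref_indices = [fate_names.index(fate) for fate in non_ref_fates]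
--     return fate_names, non_ref_fates, ref_idx, non_ref_indices
-- ===== SOURCE B (Python) =====
-- def resolve_fate_names(fate_names, ref_fate="EC"):
--     fate_names = tuple(fate_names)
--     if len(fate_names) != len(set(fate_names)):
--         raise ValueError(f"fate_names must be unique (got {fate_names})")
--     if len(fate_names) != 3:
--         raise ValueError(f"Expected exactly 3 fates (got {fate_names})")
--     if ref_fate not in fate_names:
--         raise ValueError(f"ref_fate '{ref_fate}' not found in fate_names={fate_names}")
--     ref_idx = -1
--     non_ref_fates = []
--     non_ref_indices = []
--     for i, fate in enumerate(fate_names):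
--         if fate == ref_fate:
--             ref_idx = i
--         else:
--             non_ref_fates.append(fate)
--             non_ref_indices.append(i)
--     return fate_names, non_ref_fates, ref_idx, non_ref_indices
-- ===== Notes on version B (the rewrite author's own statement) =====
-- stated objective: simpler
-- what changed: After the same three guard checks, one enumerate pass collects ref_idx, non_ref_fates and non_ref_indices together, replacing A's filter comprehension plus repeated .index scans and A's dead len!=2 re-check.
import Mathlib
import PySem

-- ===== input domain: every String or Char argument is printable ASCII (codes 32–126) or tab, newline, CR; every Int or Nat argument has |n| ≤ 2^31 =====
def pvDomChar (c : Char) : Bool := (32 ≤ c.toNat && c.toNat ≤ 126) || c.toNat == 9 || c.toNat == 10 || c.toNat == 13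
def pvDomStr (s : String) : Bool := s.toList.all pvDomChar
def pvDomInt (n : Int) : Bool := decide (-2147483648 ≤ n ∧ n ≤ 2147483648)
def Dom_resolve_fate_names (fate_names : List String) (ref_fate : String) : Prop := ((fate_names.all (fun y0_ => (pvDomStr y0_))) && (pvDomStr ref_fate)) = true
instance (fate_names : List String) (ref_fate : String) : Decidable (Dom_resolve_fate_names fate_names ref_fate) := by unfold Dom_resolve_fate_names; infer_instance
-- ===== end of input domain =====

-- B replaces A's filter comprehension plus repeated .index scans by one enumerate pass (simpler decomposition); return value only, no observable mutation.

-- ===== PORT A =====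
def resolve_fate_names (fate_names : List String) (ref_fate : String) : List String × List String × Int × List Int :=
  let non_ref_fates := fate_names.filter (fun fate => fate ≠ ref_fate)
  let ref_idx : Int := (((PySem.List.index? fate_names ref_fate).getD 0 : Nat) : Int)
  let non_ref_indices : List Int := non_ref_fates.map (fun fate => (((PySem.List.index? fate_names fate).getD 0 : Nat) : Int))
  (fate_names, non_ref_fates, ref_idx, non_ref_indices)

-- ===== PORT B =====
def resolve_fate_names_alt (fate_names : List String) (ref_fate : String) : List String × List String × Int × List Int :=
  let st := (PySem.List.enumerate fate_names).foldl
    (fun (acc : Int × List String × List Int) (p : Int × String) =>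
      if p.2 = ref_fate then (p.1, acc.2.1, acc.2.2)
      else (acc.1, acc.2.1 ++ [p.2], acc.2.2 ++ [p.1]))
    (-1, [], [])
  (fate_names, st.2.1, st.1, st.2.2)

-- ===== PRECONDITION & SPEC =====
-- Pre_ excludes exactly the inputs on which A raises ValueError (duplicates, length ≠ 3, ref_fate absent).
def Pre_resolve_fate_names (fate_names : List String) (ref_fate : String) : Prop :=
  fate_names.Nodup ∧ fate_names.length = 3 ∧ ref_fate ∈ fate_names
instance (fate_names : List String) (ref_fate : String) : Decidable (Pre_resolve_fate_names fate_names ref_fate) := by unfold Pre_resolve_fate_names; infer_instance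
def pvWitness_resolve_fate_names : List String × String := (["EC", "Mono", "Neu"], "EC")
def Spec_resolve_fate_names (fate_names : List String) (ref_fate : String) (out : List String × List String × Int × List Int) : Prop := out = resolve_fate_names_alt fate_names ref_fate
instance (fate_names : List String) (ref_fate : String) (out : List String × List String × Int × List Int) : Decidable (Spec_resolve_fate_names fate_names ref_fate out) := by unfold Spec_resolve_fate_names; infer_instance

-- ===== CLAIM (what is proved, stated in full; the proofs are below) =====
def Claim_equal_resolve_fate_names : Prop := ∀ (fate_names : List String) (ref_fate : String), Dom_resolve_fate_names fate_names ref_fate → Pre_resolve_fate_names fate_names ref_fate → Spec_resolve_fate_names fate_names ref_fate (resolve_fate_names fate_names ref_fate)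

-- ===== LEMMAS AND PROOFS =====

-- ===== VERDICT (by name: the statement is the Claim_ definition above) =====
theorem resolve_fate_names_spec : Claim_equal_resolve_fate_names := by
  intro fate_names ref_fate _ hpre
  obtain ⟨hnd, hlen, hmem⟩ := hpre
  match fate_names, hlen with
  | [a, b, c], _ =>
    simp only [List.nodup_cons, List.mem_cons, List.mem_nil_iff, or_false, List.nodup_nil,
      and_true, not_or] at hnd hmem
    obtain ⟨⟨hab, hac⟩, hbc, -⟩ := hnd
    unfold Spec_resolve_fate_names resolve_fate_names resolve_fate_names_alt
    rcases hmem with h | h | h <;> subst h <;>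
      simp [PySem.List.enumerate, PySem.List.index?, List.idxOf?, List.findIdx?, List.findIdx?.go, hab, hac, hbc,
        Ne.symm hab, Ne.symm hac, Ne.symm hbc, List.filter]
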